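-- pv_equiv track=rewrite | github.com/ignacioFinochietti/Ejercicios | Matriz binaria.py | buscarunos
-- ===== SOURCE A (Python) =====
-- def buscarunos(mat):
--     cantunos = [0] * 4
--     mitad = len(mat) // 2
--     for f, fila in enumerate(mat):
--         if f<mitad:  # Mitad superior
--             cantunos[0] = cantunos[0] + fila[:mitad].count(1)  # Primer cuadrante
--             cantunos[1] = cantunos[1] + fila[mitad:].count(1)  # Segundo cuadrante
--         else:        # Mitad inferior
--             cantunos[2] = cantunos[2] + fila[:mitad].count(1)  # Tercer cuadrante
--             cantunos[3] = cantunos[3] + fila[mitad:].count(1)  # Cuarto cuadrante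
--     return cantunos.index(max(cantunos)), max(cantunos)  # Devolvemos el máximo de la lista y su posición
-- ===== SOURCE B (Python) =====
-- def buscarunos(mat):
--     cantunos = [0, 0, 0, 0]
--     mitad = len(mat) // 2
--     for f, fila in enumerate(mat):
--         fbase = 0 if f < mitad else 2
--         for c, v in enumerate(fila):
--             if v == 1:
--                 q = fbase + (0 if c < mitad else 1)
--                 cantunos[q] += 1
--     m = max(cantunos)
--     return cantunos.index(m), m
-- ===== Notes on version B (the rewrite author's own statement) =====
-- stated objective: alternative
-- what changed: Replaces A's per-row pair of slice copies with slice.count(1) by one element-wise pass over cells via enumerate, computing each 1's quadrant index arithmetically and incrementing a counter list in place.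
import Mathlib
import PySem

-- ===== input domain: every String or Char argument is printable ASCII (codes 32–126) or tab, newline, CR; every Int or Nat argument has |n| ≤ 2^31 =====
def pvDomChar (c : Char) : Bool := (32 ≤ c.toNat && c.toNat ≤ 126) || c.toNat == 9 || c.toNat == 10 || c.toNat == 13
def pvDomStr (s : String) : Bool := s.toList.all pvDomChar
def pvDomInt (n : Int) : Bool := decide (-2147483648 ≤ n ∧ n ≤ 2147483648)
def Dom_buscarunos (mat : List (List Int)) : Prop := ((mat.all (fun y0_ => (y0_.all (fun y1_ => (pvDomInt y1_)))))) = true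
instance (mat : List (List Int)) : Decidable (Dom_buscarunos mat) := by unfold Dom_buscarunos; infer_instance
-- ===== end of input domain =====

-- B replaces A's per-row slice-and-count with one element-wise pass computing each 1's quadrant index arithmetically (alternative decomposition, same cost).


-- ===== PORT A =====
def buscarunos (mat : List (List Int)) : Int × Int :=
  let mitad : Int := PySem.Int.floordiv (PySem.List.len mat) 2
  let cantunos : List Int :=
    (PySem.List.enumerate mat 0).foldl (fun cant ff =>
      if ff.1 < mitad then
        let c0 := PySem.List.pySetD cant 0
          (PySem.List.pyGetD cant 0 0 + (PySem.List.count (PySem.List.slice ff.2 none (some mitad)) 1 : Int))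
        PySem.List.pySetD c0 1
          (PySem.List.pyGetD c0 1 0 + (PySem.List.count (PySem.List.slice ff.2 (some mitad) none) 1 : Int))
      else
        let c2 := PySem.List.pySetD cant 2
          (PySem.List.pyGetD cant 2 0 + (PySem.List.count (PySem.List.slice ff.2 none (some mitad)) 1 : Int))
        PySem.List.pySetD c2 3
          (PySem.List.pyGetD c2 3 0 + (PySem.List.count (PySem.List.slice ff.2 (some mitad) none) 1 : Int)))
      [0, 0, 0, 0]
  -- cantunos is always a 4-element list, so max() never raises; the .getD defaults are unreachable
  let m : Int := (PySem.List.max? cantunos (fun x => x)).getD 0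
  (((PySem.List.index? cantunos m).getD 0 : Nat), m)

-- ===== PORT B =====
def buscarunos_alt (mat : List (List Int)) : Int × Int :=
  let mitad : Int := PySem.Int.floordiv (PySem.List.len mat) 2
  let cantunos : List Int :=
    (PySem.List.enumerate mat 0).foldl (fun cant ff =>
      let fbase : Int := if ff.1 < mitad then 0 else 2
      (PySem.List.enumerate ff.2 0).foldl (fun s cv =>
        if cv.2 == 1 then
          let q : Int := fbase + (if cv.1 < mitad then 0 else 1)
          PySem.List.pySetD s q (PySem.List.pyGetD s q 0 + 1)
        else s) cant)
      [0, 0, 0, 0]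
  -- cantunos is always a 4-element list, so max() never raises; the .getD defaults are unreachable
  let m : Int := (PySem.List.max? cantunos (fun x => x)).getD 0
  (((PySem.List.index? cantunos m).getD 0 : Nat), m)

-- ===== PRECONDITION & SPEC =====
def Spec_buscarunos (mat : List (List Int)) (out : Int × Int) : Prop := out = buscarunos_alt mat
instance (mat : List (List Int)) (out : Int × Int) : Decidable (Spec_buscarunos mat out) := by unfold Spec_buscarunos; infer_instance

-- ===== CLAIM (what is proved, stated in full; the proofs are below) =====
def Claim_equal_buscarunos : Prop := ∀ (mat : List (List Int)), Dom_buscarunos mat → Spec_buscarunos mat (buscarunos mat)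

-- ===== LEMMAS AND PROOFS =====

-- Named forms of the two row-loop bodies (definitionally equal to the ports' lambdas; proof helpers only).
def pvInnerStepB (m fb : Int) (s : List Int) (cv : Int × Int) : List Int :=
  if cv.2 == 1 then
    PySem.List.pySetD s (fb + (if cv.1 < m then 0 else 1))
      (PySem.List.pyGetD s (fb + (if cv.1 < m then 0 else 1)) 0 + 1)
  else s

def pvStepA (m : Int) (cant : List Int) (ff : Int × List Int) : List Int :=
  if ff.1 < m then
    PySem.List.pySetD
      (PySem.List.pySetD cant 0
        (PySem.List.pyGetD cant 0 0 + (PySem.List.count (PySem.List.slice ff.2 none (some m)) 1 : Int)))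
      1
      (PySem.List.pyGetD
        (PySem.List.pySetD cant 0
          (PySem.List.pyGetD cant 0 0 + (PySem.List.count (PySem.List.slice ff.2 none (some m)) 1 : Int)))
        1 0 + (PySem.List.count (PySem.List.slice ff.2 (some m) none) 1 : Int))
  else
    PySem.List.pySetD
      (PySem.List.pySetD cant 2
        (PySem.List.pyGetD cant 2 0 + (PySem.List.count (PySem.List.slice ff.2 none (some m)) 1 : Int)))
      3
      (PySem.List.pyGetD
        (PySem.List.pySetD cant 2
          (PySem.List.pyGetD cant 2 0 + (PySem.List.count (PySem.List.slice ff.2 none (some m)) 1 : Int)))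
        3 0 + (PySem.List.count (PySem.List.slice ff.2 (some m) none) 1 : Int))

def pvStepB (m : Int) (cant : List Int) (ff : Int × List Int) : List Int :=
  (PySem.List.enumerate ff.2 0).foldl (pvInnerStepB m (if ff.1 < m then 0 else 2)) cant

-- B's inner cell loop over one row, started at column offset k, adds to the two counters
-- selected by fb exactly the counts of 1 among columns < m (left) and ≥ m (right).
set_option maxHeartbeats 1000000 in
lemma inner_core (m : Nat) (fb : Int) (hb : fb = 0 ∨ fb = 2) (fila : List Int) (k : Nat)
    (a b c d : Int) :
    List.foldl (pvInnerStepB (m : Int) fb) [a, b, c, d] (PySem.List.enumerate fila (k : Int))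
    = if fb = 0 then
        [a + ((fila.take (m - k)).count 1 : Int), b + ((fila.drop (m - k)).count 1 : Int), c, d]
      else
        [a, b, c + ((fila.take (m - k)).count 1 : Int), d + ((fila.drop (m - k)).count 1 : Int)] := by
  induction fila generalizing k a b c d with
  | nil => rcases hb with rfl | rfl <;> simp [PySem.List.enumerate_nil]
  | cons v rest ih =>
    have hc : ((k : Int) + 1) = ((k + 1 : Nat) : Int) := by push_cast; ring
    rw [PySem.List.enumerate_cons, List.foldl_cons, hc]
    by_cases hkm : k < m
    · have hkm' : ((k : Int)) < ((m : Int)) := by exact_mod_cast hkm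
      have htd : m - k = (m - (k + 1)) + 1 := by omega
      by_cases hv : v = 1
      · subst hv
        rcases hb with rfl | rfl
        · have hstep : pvInnerStepB (m : Int) 0 [a, b, c, d] ((k : Int), 1) = [a + 1, b, c, d] := by
            simp [pvInnerStepB, hkm', PySem.List.pySetD, PySem.List.pySet?, PySem.List.pyIdx?, pysem]
          rw [hstep, ih _ _ _ _]
          simp [htd]
          ring
        · have hstep : pvInnerStepB (m : Int) 2 [a, b, c, d] ((k : Int), 1) = [a, b, c + 1, d] := by
            simp [pvInnerStepB, hkm', PySem.List.pySetD, PySem.List.pySet?, PySem.List.pyIdx?, pysem]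
          rw [hstep, ih _ _ _ _]
          simp [htd]
          ring
      · have hstep : pvInnerStepB (m : Int) fb [a, b, c, d] ((k : Int), v) = [a, b, c, d] := by
          simp [pvInnerStepB, hv]
        rw [hstep, ih _ _ _ _]
        rcases hb with rfl | rfl <;> simp [htd, hv]
    · have hkm' : ¬ ((k : Int)) < ((m : Int)) := by exact_mod_cast hkm
      have ht0 : m - k = 0 := by omega
      have ht1 : m - (k + 1) = 0 := by omega
      by_cases hv : v = 1
      · subst hv
        rcases hb with rfl | rfl
        · have hstep : pvInnerStepB (m : Int) 0 [a, b, c, d] ((k : Int), 1) = [a, b + 1, c, d] := by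
            simp only [pvInnerStepB, if_neg hkm', zero_add, BEq.rfl, if_pos]
            simp [PySem.List.pySetD, PySem.List.pySet?, PySem.List.pyIdx?, pysem]
          rw [hstep, ih _ _ _ _]
          simp [ht0, ht1]
          ring
        · have hstep : pvInnerStepB (m : Int) 2 [a, b, c, d] ((k : Int), 1) = [a, b, c, d + 1] := by
            simp only [pvInnerStepB, if_neg hkm', BEq.rfl, if_pos]
            norm_num
            simp [PySem.List.pySetD, PySem.List.pySet?, PySem.List.pyIdx?, pysem]
          rw [hstep, ih _ _ _ _]
          simp [ht0, ht1]
          ring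
      · have hstep : pvInnerStepB (m : Int) fb [a, b, c, d] ((k : Int), v) = [a, b, c, d] := by
          simp [pvInnerStepB, hv]
        rw [hstep, ih _ _ _ _]
        rcases hb with rfl | rfl <;> simp [ht0, ht1, hv]

-- The two row loops agree from any 4-element counter state.
lemma outer_core (m : Nat) (rows : List (List Int)) (k : Nat) (a b c d : Int) :
    List.foldl (pvStepA (m : Int)) [a, b, c, d] (PySem.List.enumerate rows (k : Int))
    = List.foldl (pvStepB (m : Int)) [a, b, c, d] (PySem.List.enumerate rows (k : Int)) := by
  induction rows generalizing k a b c d with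
  | nil => rfl
  | cons fila rest ih =>
    have hc : ((k : Int) + 1) = ((k + 1 : Nat) : Int) := by push_cast; ring
    rw [PySem.List.enumerate_cons, List.foldl_cons, List.foldl_cons, hc]
    by_cases hkm : ((k : Int)) < ((m : Int))
    · have hA : pvStepA (m : Int) [a, b, c, d] ((k : Int), fila)
          = [a + ((fila.take m).count 1 : Int), b + ((fila.drop m).count 1 : Int), c, d] := by
        simp [pvStepA, hkm, PySem.List.pySetD, PySem.List.pySet?, PySem.List.pyIdx?, pysem,
          PySem.List.count_eq, PySem.List.slice_to_natCast, PySem.List.slice_from_natCast]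
      have hB : pvStepB (m : Int) [a, b, c, d] ((k : Int), fila)
          = [a + ((fila.take m).count 1 : Int), b + ((fila.drop m).count 1 : Int), c, d] := by
        have h0 := inner_core m 0 (Or.inl rfl) fila 0 a b c d
        simp only [Nat.cast_zero, Nat.sub_zero] at h0
        simp [pvStepB, hkm, h0]
      rw [hA, hB, ih]
    · have hA : pvStepA (m : Int) [a, b, c, d] ((k : Int), fila)
          = [a, b, c + ((fila.take m).count 1 : Int), d + ((fila.drop m).count 1 : Int)] := by
        simp [pvStepA, hkm, PySem.List.pySetD, PySem.List.pySet?, PySem.List.pyIdx?, pysem,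
          PySem.List.count_eq, PySem.List.slice_to_natCast, PySem.List.slice_from_natCast]
      have hB : pvStepB (m : Int) [a, b, c, d] ((k : Int), fila)
          = [a, b, c + ((fila.take m).count 1 : Int), d + ((fila.drop m).count 1 : Int)] := by
        have h0 := inner_core m 2 (Or.inr rfl) fila 0 a b c d
        simp only [Nat.cast_zero, Nat.sub_zero] at h0
        simp [pvStepB, hkm, h0]
      rw [hA, hB, ih]

-- The two outer row loops, written exactly as the ports write them, produce the same counters.
lemma outer_loop_eq (m : Nat) (rows : List (List Int)) (k : Nat) (a b c d : Int) :
    (PySem.List.enumerate rows (k : Int)).foldl (fun cant ff =>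
      if ff.1 < (m : Int) then
        let c0 := PySem.List.pySetD cant 0
          (PySem.List.pyGetD cant 0 0 + (PySem.List.count (PySem.List.slice ff.2 none (some (m : Int))) 1 : Int))
        PySem.List.pySetD c0 1
          (PySem.List.pyGetD c0 1 0 + (PySem.List.count (PySem.List.slice ff.2 (some (m : Int)) none) 1 : Int))
      else
        let c2 := PySem.List.pySetD cant 2
          (PySem.List.pyGetD cant 2 0 + (PySem.List.count (PySem.List.slice ff.2 none (some (m : Int))) 1 : Int))
        PySem.List.pySetD c2 3
          (PySem.List.pyGetD c2 3 0 + (PySem.List.count (PySem.List.slice ff.2 (some (m : Int)) none) 1 : Int)))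
      [a, b, c, d]
    = (PySem.List.enumerate rows (k : Int)).foldl (fun cant ff =>
      let fbase : Int := if ff.1 < (m : Int) then 0 else 2
      (PySem.List.enumerate ff.2 0).foldl (fun s cv =>
        if cv.2 == 1 then
          let q : Int := fbase + (if cv.1 < (m : Int) then 0 else 1)
          PySem.List.pySetD s q (PySem.List.pyGetD s q 0 + 1)
        else s) cant)
      [a, b, c, d] := by
  exact outer_core m rows k a b c d

-- ===== VERDICT (by name: the statement is the Claim_ definition above) =====
theorem buscarunos_spec : Claim_equal_buscarunos := by
  intro mat _
  have hm : PySem.Int.floordiv (PySem.List.len mat) 2 = ((mat.length / 2 : Nat) : Int) := by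
    simp [PySem.List.len_eq]
  have h := outer_loop_eq (mat.length / 2) mat 0 0 0 0 0
  simp only [Nat.cast_zero] at h
  show _ = _
  simp only [buscarunos, buscarunos_alt, hm]
  rw [h]
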